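-- pv_equiv track=rewrite | github.com/bnbbbb/Algotithm | 프로그래머스/2/131127. 할인 행사/할인 행사.py | solution
-- ===== SOURCE A (Python) =====
-- from collections import Counter
--
-- def solution(want, number, discount):
--     answer = 0
--     a = dict(zip(want, number))
--
--     for i in range(len(discount)):
--         result = Counter(discount[i:i+10])
--         if all(result.get(j, 0) >= x for j, x in a.items()):
--             answer += 1
--     return answer
-- ===== SOURCE B (Python) =====
-- def solution(want, number, discount):
--     a = dict(zip(want, number))
--     n = len(discount)
--     good = [0] * n
--     for k, v in a.items():
--         pref = [0]
--         for d in discount: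
--             pref.append(pref[-1] + (1 if d == k else 0))
--         good = [g + 1 if pref[min(i + 10, n)] - pref[i] >= v else g
--                 for i, g in enumerate(good)]
--     m = len(a)
--     return sum(1 for g in good if g == m)
-- ===== Notes on version B (the rewrite author's own statement) =====
-- stated objective: alternative
-- what changed: Instead of rebuilding a Counter of each 10-day window and rescanning the wanted dict per window, B builds one prefix-count array per wanted key and tallies per window how many keys meet their threshold via prefix differences, counting windows whose tally equals the number of keys.
import Mathlib
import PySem

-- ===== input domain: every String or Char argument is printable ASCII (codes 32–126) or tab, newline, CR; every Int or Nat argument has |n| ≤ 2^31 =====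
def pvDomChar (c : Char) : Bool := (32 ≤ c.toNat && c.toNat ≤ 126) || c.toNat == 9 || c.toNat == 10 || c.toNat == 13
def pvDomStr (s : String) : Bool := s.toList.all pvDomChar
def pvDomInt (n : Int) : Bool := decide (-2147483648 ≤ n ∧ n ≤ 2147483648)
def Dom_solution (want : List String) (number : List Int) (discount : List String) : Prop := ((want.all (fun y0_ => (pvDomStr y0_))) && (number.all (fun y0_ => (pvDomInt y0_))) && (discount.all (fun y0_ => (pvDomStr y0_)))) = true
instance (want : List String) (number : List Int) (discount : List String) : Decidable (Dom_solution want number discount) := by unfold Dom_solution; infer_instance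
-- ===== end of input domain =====

-- B replaces A's per-window Counter rebuild by one prefix-count array per wanted key combined
-- into a per-window satisfied-key tally (alternative decomposition; similar cost).

-- ===== PORT A =====
-- A: for each window start i, rebuild Counter(discount[i:i+10]) and test every wanted item.
def solution (want : List String) (number : List Int) (discount : List String) : Int :=
  let a := PySem.Dict.ofList (want.zip number)
  (PySem.List.pyRange 0 ((discount.length : Int)) 1).foldl (fun answer i =>
    let result := PySem.Dict.counter (PySem.List.slice discount (some i) (some (i + 10)))
    if a.items.all (fun jx => decide (result.getD jx.1 0 ≥ jx.2)) then answer + 1 else answer) 0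

-- ===== PORT B =====
-- B: for each wanted key build its prefix-count array over discount; `good i` tallies how many
-- keys are satisfied in the window starting at i; answer = windows where all keys are satisfied.
def solution_alt (want : List String) (number : List Int) (discount : List String) : Int :=
  let a := PySem.Dict.ofList (want.zip number)
  let n : Int := (discount.length : Int)
  let good : List Int := List.replicate discount.length 0
  let good := a.items.foldl (fun good kv =>
      let pref : List Int := discount.foldl
        (fun pref d => pref ++ [PySem.List.pyGetD pref (-1) 0 + (if d == kv.1 then 1 else 0)]) [0]
      (PySem.List.enumerate good).map
        (fun ig => if PySem.List.pyGetD pref (min (ig.1 + 10) n) 0 - PySem.List.pyGetD pref ig.1 0 ≥ kv.2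
                   then ig.2 + 1 else ig.2)) good
  good.foldl (fun s g => if g = ((PySem.Dict.size a : Nat) : Int) then s + 1 else s) 0

-- ===== PRECONDITION & SPEC =====
def Spec_solution (want : List String) (number : List Int) (discount : List String) (out : Int) : Prop := out = solution_alt want number discount
instance (want : List String) (number : List Int) (discount : List String) (out : Int) : Decidable (Spec_solution want number discount out) := by unfold Spec_solution; infer_instance

-- ===== CLAIM (what is proved, stated in full; the proofs are below) =====
def Claim_equal_solution : Prop := ∀ (want : List String) (number : List Int) (discount : List String), Dom_solution want number discount → Spec_solution want number discount (solution want number discount)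

-- ===== LEMMAS AND PROOFS =====

-- window condition: wanted pair kv is satisfied by the (clamped) size-10 window starting at i
def pvW (discount : List String) (i : Nat) (kv : String × Int) : Bool :=
  decide (kv.2 ≤ (((discount.drop i).take 10).count kv.1 : Int))

-- B's inner prefix fold builds the table of prefix counts of key k
theorem pref_spec (discount : List String) (k : String) :
    discount.foldl (fun pref d => pref ++ [PySem.List.pyGetD pref (-1) 0 + (if d == k then 1 else 0)]) [0]
      = (List.range (discount.length + 1)).map (fun j => (((discount.take j).count k : Nat) : Int)) := by
  induction discount using List.reverseRecOn with
  | nil => simp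
  | append_singleton l d ih =>
    rw [List.foldl_append, List.foldl_cons, List.foldl_nil, ih]
    have hsplit : (List.range (l.length + 1)).map (fun j => (((l.take j).count k : Nat) : Int))
        = (List.range l.length).map (fun j => (((l.take j).count k : Nat) : Int))
          ++ [((l.count k : Nat) : Int)] := by
      rw [List.range_succ, List.map_append]; simp
    rw [hsplit, PySem.List.pyGetD_neg_one_append_singleton]
    rw [show (l ++ [d]).length + 1 = l.length + 1 + 1 by simp]
    rw [List.range_succ, List.map_append]
    congr 1
    · rw [← hsplit]
      apply List.map_congr_left
      intro j hj
      rw [List.mem_range] at hj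
      rw [List.take_append_of_le_length (by omega)]
    · rw [List.map_singleton, List.take_of_length_le (by simp)]
      by_cases h : d = k <;> simp [List.count_append, h]

-- the clamped prefix difference is the count inside the size-10 window at i
theorem window_count (discount : List String) (k : String) (i : Nat) :
    (discount.take (min (i + 10) discount.length)).count k
      = (discount.take i).count k + ((discount.drop i).take 10).count k := by
  have h1 : (discount.take (min (i + 10) discount.length)).count k
      = (discount.take (i + 10)).count k := by
    by_cases h : i + 10 ≤ discount.length
    · rw [min_eq_left h]
    · rw [min_eq_right (by omega), List.take_length,
          List.take_of_length_le (by omega)]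
  rw [h1, List.take_add, List.count_append]

-- evaluating B's per-key pass on a good-table of the canonical shape
theorem step_eval (discount : List String) (kv : String × Int) (g : Nat → Int) :
    (PySem.List.enumerate ((List.range discount.length).map g)).map
        (fun ig => if PySem.List.pyGetD
              (discount.foldl (fun pref d => pref ++ [PySem.List.pyGetD pref (-1) 0 + (if d == kv.1 then 1 else 0)]) [0])
              (min (ig.1 + 10) ((discount.length : Nat) : Int)) 0
            - PySem.List.pyGetD
              (discount.foldl (fun pref d => pref ++ [PySem.List.pyGetD pref (-1) 0 + (if d == kv.1 then 1 else 0)]) [0])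
              ig.1 0 ≥ kv.2
          then ig.2 + 1 else ig.2)
      = (List.range discount.length).map (fun i => if pvW discount i kv then g i + 1 else g i) := by
  rw [pref_spec, PySem.List.enumerate_eq_map_pyRange _ (0 : Int), PySem.List.pyRange_one]
  simp only [PySem.List.len_eq, List.length_map, List.length_range, sub_zero, Int.toNat_natCast,
    List.map_map, zero_add]
  apply List.map_congr_left
  intro i hi
  rw [List.mem_range] at hi
  simp only [Function.comp]
  have hmin : min ((i : Int) + 10) ((discount.length : Nat) : Int)
      = ((min (i + 10) discount.length : Nat) : Int) := by
    push_cast [Nat.cast_min]; ring_nf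
  have hget : PySem.List.pyGetD ((List.range discount.length).map g) (i : Int) 0 = g i := by
    rw [PySem.List.pyGetD_natCast, PySem.List.getD_map_range _ _ _ _ hi]
  have hp1 : PySem.List.pyGetD
      ((List.range (discount.length + 1)).map (fun j => (((discount.take j).count kv.1 : Nat) : Int)))
      (min ((i : Int) + 10) ((discount.length : Nat) : Int)) 0
      = (((discount.take (min (i + 10) discount.length)).count kv.1 : Nat) : Int) := by
    rw [hmin, PySem.List.pyGetD_natCast, PySem.List.getD_map_range _ _ _ _ (by omega)]
  have hp2 : PySem.List.pyGetD
      ((List.range (discount.length + 1)).map (fun j => (((discount.take j).count kv.1 : Nat) : Int)))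
      (i : Int) 0 = (((discount.take i).count kv.1 : Nat) : Int) := by
    rw [PySem.List.pyGetD_natCast, PySem.List.getD_map_range _ _ _ _ (by omega)]
  rw [hget, hp1, hp2, window_count]
  have hcond : (kv.2 ≤ (((discount.take i).count kv.1 + ((discount.drop i).take 10).count kv.1 : Nat) : Int)
        - (((discount.take i).count kv.1 : Nat) : Int))
      ↔ (kv.2 ≤ ((((discount.drop i).take 10).count kv.1 : Nat) : Int)) := by
    push_cast; omega
  simp only [ge_iff_le, pvW, hcond, decide_eq_true_eq]

-- invariant of B's fold over the wanted items: good i = number of keys satisfied at window i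
set_option maxHeartbeats 1000000 in
theorem fold_items (discount : List String) (ps : List (String × Int)) :
    ps.foldl (fun (good : List Int) (kv : String × Int) =>
      (PySem.List.enumerate good).map
        (fun ig => if PySem.List.pyGetD
              (discount.foldl (fun pref d => pref ++ [PySem.List.pyGetD pref (-1) 0 + (if d == kv.1 then 1 else 0)]) [0])
              (min (ig.1 + 10) ((discount.length : Nat) : Int)) 0
            - PySem.List.pyGetD
              (discount.foldl (fun pref d => pref ++ [PySem.List.pyGetD pref (-1) 0 + (if d == kv.1 then 1 else 0)]) [0])
              ig.1 0 ≥ kv.2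
          then ig.2 + 1 else ig.2)) (List.replicate discount.length 0)
      = (List.range discount.length).map (fun i => ((ps.countP (pvW discount i) : Nat) : Int)) := by
  induction ps using List.reverseRecOn with
  | nil =>
    simp [List.map_const']
  | append_singleton qs kv ih =>
    rw [List.foldl_append, List.foldl_cons, List.foldl_nil, ih,
        step_eval discount kv (fun i => ((qs.countP (pvW discount i) : Nat) : Int))]
    apply List.map_congr_left
    intro i _
    rw [List.countP_append]
    by_cases h : pvW discount i kv = true <;> simp [h, List.countP_cons] <;> push_cast

-- A counts the windows whose every wanted pair is satisfied
set_option maxHeartbeats 1000000 in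
theorem solution_eq_countP (want : List String) (number : List Int) (discount : List String) :
    solution want number discount
      = ((List.range discount.length).countP
          (fun i => (PySem.Dict.ofList (want.zip number)).items.all (pvW discount i)) : Int) := by
  unfold solution
  rw [PySem.List.pyRange_one]
  simp only [sub_zero, Int.toNat_natCast, List.foldl_map, zero_add]
  rw [PySem.List.foldl_if_add_one
    (fun i : Nat => (PySem.Dict.ofList (want.zip number)).items.all
      (fun jx => decide ((PySem.Dict.counter (PySem.List.slice discount (some (i : Int)) (some ((i : Int) + 10)))).getD jx.1 0 ≥ jx.2)))]
  rw [zero_add, Nat.cast_inj]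
  apply List.countP_congr
  intro i _
  have hsl : PySem.List.slice discount (some (i : Int)) (some ((i : Int) + 10))
      = (discount.drop i).take 10 := by
    have := PySem.List.slice_natCast_add discount i 10
    simpa using this
  rw [hsl]
  have hall := List.all_congr (rfl : (PySem.Dict.ofList (want.zip number)).items = _)
    (fun jx => by simp [pvW, PySem.Dict.getD_counter, ge_iff_le] : ∀ jx : String × Int,
      (decide ((PySem.Dict.counter ((discount.drop i).take 10)).getD jx.1 0 ≥ jx.2)) = pvW discount i jx)
  rw [hall]

-- B counts the same windows
set_option maxHeartbeats 1000000 in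
theorem alt_eq_countP (want : List String) (number : List Int) (discount : List String) :
    solution_alt want number discount
      = ((List.range discount.length).countP
          (fun i => (PySem.Dict.ofList (want.zip number)).items.all (pvW discount i)) : Int) := by
  unfold solution_alt
  simp only []
  rw [fold_items]
  rw [PySem.List.foldl_ite_add_one
    (fun g : Int => g = ((PySem.Dict.size (PySem.Dict.ofList (want.zip number)) : Nat) : Int))]
  rw [zero_add, List.countP_map, Nat.cast_inj]
  apply List.countP_congr
  intro i _
  simp only [Function.comp]
  have hsz : (PySem.Dict.size (PySem.Dict.ofList (want.zip number)) : Nat)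
      = (PySem.Dict.ofList (want.zip number)).items.length := rfl
  rw [hsz]
  simp only [decide_eq_true_eq, Nat.cast_inj]
  rw [List.all_eq_true]
  exact List.countP_eq_length

-- ===== VERDICT (by name: the statement is the Claim_ definition above) =====
theorem solution_spec : Claim_equal_solution := by
  intro want number discount _
  show solution want number discount = solution_alt want number discount
  rw [solution_eq_countP, alt_eq_countP]
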